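-- pv_equiv track=rewrite | github.com/seokjin1023/baekjoon | 프로그래머스/2/152996. 시소 짝꿍/시소 짝꿍.py | solution
-- ===== SOURCE A (Python) =====
-- from collections import Counter
--
-- def solution(weights):
--     cnt = Counter(weights)
--     answer = 0
--
--
--     for w, c in cnt.items():
--         answer += c * (c - 1) // 2
--
--     distances = [2, 3, 4]
--     for d1 in distances:
--         for d2 in distances:
--             if d1 == d2:
--                 continue
--
--             for w in cnt:
--                 if (w * d1) % d2 != 0:
--                     continue
--
--                 w2 = (w * d1) // d2
--                 if w < w2 and w2 in cnt:
--                     answer += cnt[w] * cnt[w2]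
--
--     return answer
-- ===== SOURCE B (Python) =====
-- def solution(weights):
--     cnt = {}
--     for w in weights:
--         cnt[w] = cnt.get(w, 0) + 1
--     answer = 0
--     items = list(cnt.items())
--     for _, c in items:
--         answer += c * (c - 1) // 2
--     # pair each distinct weight with every distinct weight after it,
--     # counting the pair when the two weights can balance (ratio 2:3, 1:2 or 3:4)
--     while items:
--         w1, c1 = items[0]
--         items = items[1:]
--         for w2, c2 in items:
--             if (w2 * 2 == w1 * 3 or w2 * 3 == w1 * 2
--                     or w2 == w1 * 2 or w2 * 2 == w1
--                     or w2 * 3 == w1 * 4 or w2 * 4 == w1 * 3):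
--                 answer += c1 * c2
--     return answer
-- ===== Notes on version B (the rewrite author's own statement) =====
-- stated objective: alternative
-- what changed: Instead of A's loop over distance pairs computing each weight's partner weight (w*d1)//d2 with a divisibility check and a dict lookup, B scans all unordered pairs of distinct weights once and tests the balance ratios 2:3, 1:2, 3:4 directly by cross-multiplication; the same-weight pairs term is kept.
import Mathlib
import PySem

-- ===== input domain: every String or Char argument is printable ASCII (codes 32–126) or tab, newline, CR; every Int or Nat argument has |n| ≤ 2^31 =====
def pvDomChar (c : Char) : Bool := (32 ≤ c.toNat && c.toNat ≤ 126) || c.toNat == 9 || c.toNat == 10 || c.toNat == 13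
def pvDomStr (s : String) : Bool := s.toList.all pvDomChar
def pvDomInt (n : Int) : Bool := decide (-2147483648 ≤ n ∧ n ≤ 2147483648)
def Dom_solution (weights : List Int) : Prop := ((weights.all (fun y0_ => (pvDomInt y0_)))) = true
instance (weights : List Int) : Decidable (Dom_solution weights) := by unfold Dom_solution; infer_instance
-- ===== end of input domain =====

-- B replaces A's partner-weight computation ((w*d1)//d2 + dict lookup) by a direct scan over
-- unordered pairs of distinct weights testing the balance ratios by cross-multiplication
-- (alternative algorithm of similar cost; not claimed faster).

-- ===== PORT A =====
def solution (weights : List Int) : Int :=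
  let cnt := PySem.Dict.counter weights
  let answer : Int := cnt.items.foldl (fun a p => a + PySem.Int.floordiv (p.2 * (p.2 - 1)) 2) 0
  let distances : List Int := [2, 3, 4]
  distances.foldl (fun a d1 =>
    distances.foldl (fun a d2 =>
      if d1 = d2 then a
      else cnt.keys.foldl (fun a w =>
        if PySem.Int.mod (w * d1) d2 ≠ 0 then a
        else
          let w2 := PySem.Int.floordiv (w * d1) d2
          if w < w2 ∧ cnt.contains w2 = true then a + cnt.getD w 0 * cnt.getD w2 0 else a) a) a)
    answer

-- ===== PORT B =====
def pvBal (w1 w2 : Int) : Bool :=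
  w2 * 2 == w1 * 3 || w2 * 3 == w1 * 2 || w2 == w1 * 2 || w2 * 2 == w1 ||
  w2 * 3 == w1 * 4 || w2 * 4 == w1 * 3

def pvPairLoop : List (Int × Int) → Int → Int
  | [], answer => answer
  | p :: rest, answer =>
      pvPairLoop rest (rest.foldl (fun a q => if pvBal p.1 q.1 then a + p.2 * q.2 else a) answer)

def solution_alt (weights : List Int) : Int :=
  let cnt := weights.foldl (fun d w => d.insert w (d.getD w 0 + 1)) PySem.Dict.empty
  let items := cnt.items
  let answer : Int := items.foldl (fun a p => a + PySem.Int.floordiv (p.2 * (p.2 - 1)) 2) 0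
  pvPairLoop items answer

-- ===== PRECONDITION & SPEC =====
def Spec_solution (weights : List Int) (out : Int) : Prop := out = solution_alt weights
instance (weights : List Int) (out : Int) : Decidable (Spec_solution weights out) := by unfold Spec_solution; infer_instance

-- ===== CLAIM (what is proved, stated in full; the proofs are below) =====
def Claim_equal_solution : Prop := ∀ (weights : List Int), Dom_solution weights → Spec_solution weights (solution weights)

-- ===== LEMMAS AND PROOFS =====

-- count of w in weights, as an Int
def pvC (weights : List Int) (w : Int) : Int := (List.count w weights : Int)

-- one A-side contribution, re-expressed as a predicate on the ordered pair (w, w')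
def pvG (weights : List Int) (d1 d2 w w' : Int) : Int :=
  if w' * d2 = w * d1 ∧ w < w' then pvC weights w * pvC weights w' else 0

-- the balanced-pair contribution
def pvF (weights : List Int) (w w' : Int) : Int :=
  if w < w' ∧ pvBal w w' = true then pvC weights w * pvC weights w' else 0

-- specification of B's pair loop as a sum
def pvPS : List (Int × Int) → Int
  | [] => 0
  | p :: rest => ((rest.map (fun q => if pvBal p.1 q.1 then p.2 * q.2 else 0)).sum) + pvPS rest

theorem pvPS_cons (w c : Int) (rest : List (Int × Int)) :
    pvPS ((w, c) :: rest)
      = ((rest.map (fun q => if pvBal w q.1 then c * q.2 else 0)).sum) + pvPS rest := rfl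

theorem pvFoldIf {β : Type} (l : List β) (P : β → Prop) [DecidablePred P] (g : β → Int) (a : Int) :
    l.foldl (fun a x => if P x then a + g x else a) a
      = a + (l.map (fun x => if P x then g x else 0)).sum := by
  have h : (fun (a : Int) (x : β) => if P x then a + g x else a)
      = fun a x => a + (if P x then g x else 0) := by
    funext a x; split <;> simp
  rw [h, PySem.List.foldl_add]

theorem pvFoldIf2 {β : Type} (l : List β) (P Q : β → Prop) [DecidablePred P] [DecidablePred Q]
    (g : β → Int) (a : Int) :
    l.foldl (fun a x => if P x then a else if Q x then a + g x else a) a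
      = a + (l.map (fun x => if P x then 0 else if Q x then g x else 0)).sum := by
  have h : (fun (a : Int) (x : β) => if P x then a else if Q x then a + g x else a)
      = fun a x => a + (if P x then 0 else if Q x then g x else 0) := by
    funext a x; split
    · simp
    · split <;> simp
  rw [h, PySem.List.foldl_add]

theorem pvPick (l : List Int) (hl : l.Nodup) (q : Int) (P : Int → Prop) [DecidablePred P]
    (f : Int → Int) :
    (l.map (fun w' => if w' = q ∧ P w' then f w' else 0)).sum
      = if q ∈ l ∧ P q then f q else 0 := by
  induction l with
  | nil => simp
  | cons x t ih =>
    rw [List.nodup_cons] at hl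
    rw [List.map_cons, List.sum_cons, ih hl.2]
    by_cases hx : x = q
    · subst hx
      by_cases hp : P x <;> simp [hp, hl.1]
    · simp [hx, List.mem_cons, Ne.symm hx]

theorem pvDivEq (d1 d2 w w' : Int) (hd : 0 < d2) :
    (w' * d2 = w * d1 ∧ w < w')
      ↔ (PySem.Int.mod (w * d1) d2 = 0 ∧ (w' = PySem.Int.floordiv (w * d1) d2 ∧ w < w')) := by
  have hmm := PySem.Int.floordiv_mul_add_mod (w * d1) d2
  constructor
  · rintro ⟨he, hlt⟩
    have hdvd : d2 ∣ w * d1 := ⟨w', by linarith [mul_comm w' d2]⟩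
    have hm : PySem.Int.mod (w * d1) d2 = 0 := (PySem.Int.mod_eq_zero_iff_dvd _ _).mpr hdvd
    refine ⟨hm, ?_, hlt⟩
    rw [hm, add_zero] at hmm
    have : w' * d2 = PySem.Int.floordiv (w * d1) d2 * d2 := by rw [hmm, he]
    exact mul_right_cancel₀ (by omega) this
  · rintro ⟨hm, he, hlt⟩
    rw [hm, add_zero] at hmm
    exact ⟨by rw [he, hmm], hlt⟩

-- A's loop body at one weight w equals a sum over all distinct weights
theorem pvInnerSum (weights : List Int) (d1 d2 : Int) (hd : 0 < d2) (w : Int) :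
    (if PySem.Int.mod (w * d1) d2 ≠ 0 then 0
     else if w < PySem.Int.floordiv (w * d1) d2 ∧ weights.contains (PySem.Int.floordiv (w * d1) d2) = true
          then pvC weights w * pvC weights (PySem.Int.floordiv (w * d1) d2) else 0)
      = ((PySem.Set.ofList weights).map (fun w' => pvG weights d1 d2 w w')).sum := by
  by_cases hm : PySem.Int.mod (w * d1) d2 = 0
  · have hcong : ∀ w' ∈ PySem.Set.ofList weights,
        pvG weights d1 d2 w w'
          = (fun w' => if w' = PySem.Int.floordiv (w * d1) d2 ∧ w < w'
              then pvC weights w * pvC weights w' else 0) w' := by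
      intro w' _
      simp only [pvG]
      congr 1
      rw [pvDivEq d1 d2 w w' hd]
      simp [hm]
    rw [List.map_congr_left hcong,
      pvPick _ (PySem.Set.nodup_ofList weights) _ (fun w' => w < w') _]
    simp only [hm, ne_eq, not_true_eq_false, if_false, PySem.Set.mem_ofList,
      List.contains_iff_mem]
    by_cases h1 : w < PySem.Int.floordiv (w * d1) d2 <;>
      by_cases h2 : PySem.Int.floordiv (w * d1) d2 ∈ weights <;> simp [h1, h2]
  · have hz : ∀ x ∈ (PySem.Set.ofList weights).map (fun w' => pvG weights d1 d2 w w'), x = 0 := by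
      intro x hx
      rcases List.mem_map.mp hx with ⟨w', _, rfl⟩
      rw [pvG, if_neg]
      rintro ⟨he, _⟩
      exact hm ((PySem.Int.mod_eq_zero_iff_dvd _ _).mpr ⟨w', by linarith [mul_comm w' d2]⟩)
    rw [List.sum_eq_zero hz, if_pos hm]

-- the six distance pairs, pointwise, give exactly the balance predicate
theorem pvSixG (weights : List Int) (w w' : Int) :
    pvG weights 2 3 w w' + pvG weights 2 4 w w' + pvG weights 3 2 w w' + pvG weights 3 4 w w'
      + pvG weights 4 2 w w' + pvG weights 4 3 w w' = pvF weights w w' := by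
  simp only [pvG, pvF, pvBal, Bool.or_eq_true, beq_iff_eq]
  generalize pvC weights w * pvC weights w' = k
  split_ifs <;> omega

theorem pvF_self (weights : List Int) (w : Int) : pvF weights w w = 0 := by simp [pvF]

theorem pvF_pair (weights : List Int) (x y : Int) (h : x ≠ y) :
    pvF weights x y + pvF weights y x
      = if pvBal x y then pvC weights x * pvC weights y else 0 := by
  simp only [pvF, pvBal, Bool.or_eq_true, beq_iff_eq]
  rw [mul_comm (pvC weights y)]
  generalize pvC weights x * pvC weights y = k
  split_ifs <;> omega

theorem pvPairLoop_eq (l : List (Int × Int)) (a : Int) : pvPairLoop l a = a + pvPS l := by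
  induction l generalizing a with
  | nil => simp [pvPairLoop, pvPS]
  | cons p rest ih =>
    rw [pvPairLoop, pvFoldIf rest (fun q => pvBal p.1 q.1 = true) (fun q => p.2 * q.2) a, ih]
    show _ = a + pvPS (p :: rest)
    rw [pvPS_cons]
    ring

-- the symmetric double sum over a duplicate-free list equals B's pair sum
theorem pvDouble (weights : List Int) (l : List Int) (hl : l.Nodup) :
    (l.map (fun w => (l.map (fun w' => pvF weights w w')).sum)).sum
      = pvPS (l.map (fun k => (k, pvC weights k))) := by
  induction l with
  | nil => simp [pvPS]
  | cons x t ih =>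
    rw [List.nodup_cons] at hl
    simp only [List.map_cons, List.sum_cons]
    rw [pvPS_cons, pvF_self,
      PySem.List.sum_map_add_int t (fun w => pvF weights w x)
        (fun w => (t.map (fun w' => pvF weights w w')).sum),
      ih hl.2]
    have hpair : (t.map (fun w' => pvF weights x w')).sum + (t.map (fun w => pvF weights w x)).sum
        = (t.map (fun w' => if pvBal x w' then pvC weights x * pvC weights w' else 0)).sum := by
      rw [← PySem.List.sum_map_add_int]
      refine congrArg List.sum (List.map_congr_left (fun w hw => ?_))
      exact pvF_pair weights x w (fun he => hl.1 (he ▸ hw))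
    have hmm : (List.map (fun k => ((k : Int), pvC weights k)) t).map
          (fun q => if pvBal x q.1 then (pvC weights x) * q.2 else 0)
        = t.map (fun w' => if pvBal x w' then pvC weights x * pvC weights w' else 0) := by
      rw [List.map_map]; rfl
    rw [hmm]
    omega

theorem pvMain (weights : List Int) : solution weights = solution_alt weights := by
  unfold solution solution_alt
  rw [PySem.Dict.foldl_insert_getD_add_one_eq_counter]
  simp only [PySem.Dict.keys_counter, PySem.Dict.getD_counter, PySem.Dict.contains_counter,
    PySem.Dict.items_counter]
  have hc : ∀ (w : Int), ((List.count w weights : Nat) : Int) = pvC weights w := fun _ => rfl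
  simp only [hc]
  rw [pvPairLoop_eq]
  set ks := PySem.Set.ofList weights with hks
  set answer : Int := ((ks.map fun k => (k, pvC weights k)).foldl
      (fun a p => a + PySem.Int.floordiv (p.2 * (p.2 - 1)) 2) 0) with hans
  have hinner : ∀ (d1 d2 : Int), 0 < d2 → ∀ a : Int,
      ks.foldl (fun a w =>
        if PySem.Int.mod (w * d1) d2 ≠ 0 then a
        else if w < PySem.Int.floordiv (w * d1) d2 ∧
              weights.contains (PySem.Int.floordiv (w * d1) d2) = true
          then a + pvC weights w * pvC weights (PySem.Int.floordiv (w * d1) d2) else a) a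
      = a + (ks.map (fun w => (ks.map (fun w' => pvG weights d1 d2 w w')).sum)).sum := by
    intro d1 d2 hd a
    rw [pvFoldIf2 ks (fun w => PySem.Int.mod (w * d1) d2 ≠ 0)
        (fun w => w < PySem.Int.floordiv (w * d1) d2 ∧
          weights.contains (PySem.Int.floordiv (w * d1) d2) = true)
        (fun w => pvC weights w * pvC weights (PySem.Int.floordiv (w * d1) d2)) a]
    exact congrArg (a + ·) (congrArg List.sum
      (List.map_congr_left (fun w _ => pvInnerSum weights d1 d2 hd w)))
  simp only [List.foldl_cons, List.foldl_nil]
  simp only [Int.reduceEq, reduceIte]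
  rw [hinner 2 3 (by norm_num), hinner 2 4 (by norm_num), hinner 3 2 (by norm_num),
    hinner 3 4 (by norm_num), hinner 4 2 (by norm_num), hinner 4 3 (by norm_num)]
  have h6 : ∀ w : Int,
      (ks.map (fun w' => pvG weights 2 3 w w')).sum + (ks.map (fun w' => pvG weights 2 4 w w')).sum
      + (ks.map (fun w' => pvG weights 3 2 w w')).sum + (ks.map (fun w' => pvG weights 3 4 w w')).sum
      + (ks.map (fun w' => pvG weights 4 2 w w')).sum + (ks.map (fun w' => pvG weights 4 3 w w')).sum
      = (ks.map (fun w' => pvF weights w w')).sum := by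
    intro w
    rw [← PySem.List.sum_map_add_int, ← PySem.List.sum_map_add_int, ← PySem.List.sum_map_add_int,
      ← PySem.List.sum_map_add_int, ← PySem.List.sum_map_add_int]
    exact congrArg List.sum (List.map_congr_left (fun w' _ => pvSixG weights w w'))
  have houter :
      (ks.map (fun w => (ks.map (fun w' => pvG weights 2 3 w w')).sum)).sum
      + (ks.map (fun w => (ks.map (fun w' => pvG weights 2 4 w w')).sum)).sum
      + (ks.map (fun w => (ks.map (fun w' => pvG weights 3 2 w w')).sum)).sum
      + (ks.map (fun w => (ks.map (fun w' => pvG weights 3 4 w w')).sum)).sum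
      + (ks.map (fun w => (ks.map (fun w' => pvG weights 4 2 w w')).sum)).sum
      + (ks.map (fun w => (ks.map (fun w' => pvG weights 4 3 w w')).sum)).sum
      = pvPS (ks.map (fun k => (k, pvC weights k))) := by
    rw [← PySem.List.sum_map_add_int, ← PySem.List.sum_map_add_int, ← PySem.List.sum_map_add_int,
      ← PySem.List.sum_map_add_int, ← PySem.List.sum_map_add_int,
      ← pvDouble weights ks (hks ▸ PySem.Set.nodup_ofList weights)]
    exact congrArg List.sum (List.map_congr_left (fun w _ => h6 w))
  omega

-- ===== VERDICT (by name: the statement is the Claim_ definition above) =====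
theorem solution_spec : Claim_equal_solution := by
  intro weights _
  unfold Spec_solution
  exact pvMain weights
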